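-- pv_equiv track=rewrite | github.com/thalesdeluca/godot-cpp-template-macros | tools/gdheader_gen.py | build_signal_params_string
-- ===== SOURCE A (Python) =====
-- TYPE_MAP = {
--     'float':    'FLOAT',
--     'double':   'FLOAT',
--     'int':      'INT',
--     'bool':     'BOOL',
--     'String':   'STRING',
--     'Vector2':  'VECTOR2',
--     'Vector3':  'VECTOR3',
--     'Color':    'COLOR',
--     'NodePath': 'NODE_PATH',
-- }
--
-- def get_variant_type(cpp_type):
--     return TYPE_MAP.get(cpp_type, 'NIL')
--
-- def build_signal_params_string(parameters_array):
--     types = []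
--     names = []
--     params_string = ''
--     for i, raw_parameter in enumerate(parameters_array.split(',')):
--         if i % 2 == 0:
--             types.append(raw_parameter.strip())
--         else:
--             names.append(raw_parameter.strip())
--     for i, t in enumerate(types):
--         variant_type = get_variant_type(t)
--         name = names[i] if i < len(names) else f'param{i}'
--         params_string += f', PropertyInfo(Variant::{variant_type}, "{name}")'
--     return params_string
-- ===== SOURCE B (Python) =====
-- TYPE_MAP = {
--     'float':    'FLOAT',
--     'double':   'FLOAT',
--     'int':      'INT',
--     'bool':     'BOOL',
--     'String':   'STRING',
--     'Vector2':  'VECTOR2',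
--     'Vector3':  'VECTOR3',
--     'Color':    'COLOR',
--     'NodePath': 'NODE_PATH',
-- }
--
-- def get_variant_type(cpp_type):
--     return TYPE_MAP.get(cpp_type, 'NIL')
--
-- def build_signal_params_string(parameters_array):
--     # single pairwise pass: consume (type, name) token pairs directly
--     def go(tokens, k):
--         if not tokens:
--             return ''
--         variant_type = get_variant_type(tokens[0].strip())
--         if len(tokens) >= 2:
--             name = tokens[1].strip()
--             rest = tokens[2:]
--         else:
--             name = f'param{k}'
--             rest = []
--         return f', PropertyInfo(Variant::{variant_type}, "{name}")' + go(rest, k + 1)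
--     return go(parameters_array.split(','), 0)
-- ===== Notes on version B (the rewrite author's own statement) =====
-- stated objective: simpler
-- what changed: Replaces A's parity-split of the tokens into separate types/names lists followed by a second indexed zipping pass (with a bounds-checked names[i] lookup) by a single pairwise recursion that consumes each (type, name) token pair in one pass, with no intermediate lists.
import Mathlib
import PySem

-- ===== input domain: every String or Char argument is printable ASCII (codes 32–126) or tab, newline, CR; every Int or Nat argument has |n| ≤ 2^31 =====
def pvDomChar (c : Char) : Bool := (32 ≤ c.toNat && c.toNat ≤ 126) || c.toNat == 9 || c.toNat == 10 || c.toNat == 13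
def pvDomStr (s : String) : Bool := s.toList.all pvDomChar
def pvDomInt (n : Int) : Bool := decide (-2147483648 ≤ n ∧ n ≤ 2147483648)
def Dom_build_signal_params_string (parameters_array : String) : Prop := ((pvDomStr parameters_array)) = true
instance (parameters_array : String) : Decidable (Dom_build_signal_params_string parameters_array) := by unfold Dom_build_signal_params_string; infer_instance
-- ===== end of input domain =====

-- B replaces A's parity-split into two lists plus a second indexed zipping pass by a single
-- pairwise recursion over the token list (objective: simpler, one pass, no intermediate lists).

-- ===== PORT A =====
def TYPE_MAP : PySem.Dict String String := PySem.Dict.ofList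
  [("float", "FLOAT"), ("double", "FLOAT"), ("int", "INT"), ("bool", "BOOL"),
   ("String", "STRING"), ("Vector2", "VECTOR2"), ("Vector3", "VECTOR3"),
   ("Color", "COLOR"), ("NodePath", "NODE_PATH")]

def get_variant_type (cpp_type : String) : String :=
  TYPE_MAP.getD cpp_type "NIL"

-- first loop: 'for i, raw_parameter in enumerate(...): if i % 2 == 0: types.append(...) else: names.append(...)'
def pvLoop1 : List String → Int → List String × List String → List String × List String
  | [], _, st => st
  | raw :: rest, i, (types, names) =>
    if PySem.Int.mod i 2 == 0 then
      pvLoop1 rest (i + 1) (types ++ [PySem.Str.strip raw], names)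
    else
      pvLoop1 rest (i + 1) (types, names ++ [PySem.Str.strip raw])

-- second loop: 'for i, t in enumerate(types): ... params_string += ...'
def pvLoop2 : List String → Int → List String → String → String
  | [], _, _, acc => acc
  | t :: rest, i, names, acc =>
    let variant_type := get_variant_type t
    let name := if i < (names.length : Int) then PySem.List.pyGetD names i ""
                else "param" ++ PySem.Int.toStr i
    pvLoop2 rest (i + 1) names
      (acc ++ (", PropertyInfo(Variant::" ++ variant_type ++ ", \"" ++ name ++ "\")"))

def build_signal_params_string (parameters_array : String) : String :=
  let tn := pvLoop1 ((PySem.Str.split? parameters_array ",").getD []) 0 ([], [])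
  pvLoop2 tn.1 0 tn.2 ""

-- ===== PORT B =====
def get_variant_type_alt (cpp_type : String) : String :=
  (PySem.Dict.ofList
    [("float", "FLOAT"), ("double", "FLOAT"), ("int", "INT"), ("bool", "BOOL"),
     ("String", "STRING"), ("Vector2", "VECTOR2"), ("Vector3", "VECTOR3"),
     ("Color", "COLOR"), ("NodePath", "NODE_PATH")]).getD cpp_type "NIL"

-- 'def go(tokens, k): ...' — consumes (type, name) pairs in one pass
def pvGo : List String → Int → String
  | [], _ => ""
  | tok :: rest, k =>
    let variant_type := get_variant_type_alt (PySem.Str.strip tok)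
    match rest with
    | [] =>
      ", PropertyInfo(Variant::" ++ variant_type ++ ", \"" ++
        ("param" ++ PySem.Int.toStr k) ++ "\")" ++ pvGo [] (k + 1)
    | nm :: rest' =>
      ", PropertyInfo(Variant::" ++ variant_type ++ ", \"" ++
        PySem.Str.strip nm ++ "\")" ++ pvGo rest' (k + 1)

def build_signal_params_string_alt (parameters_array : String) : String :=
  pvGo ((PySem.Str.split? parameters_array ",").getD []) 0

-- ===== PRECONDITION & SPEC =====
def Spec_build_signal_params_string (parameters_array : String) (out : String) : Prop := out = build_signal_params_string_alt parameters_array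
instance (parameters_array : String) (out : String) : Decidable (Spec_build_signal_params_string parameters_array out) := by unfold Spec_build_signal_params_string; infer_instance

-- ===== CLAIM (what is proved, stated in full; the proofs are below) =====
def Claim_equal_build_signal_params_string : Prop := ∀ (parameters_array : String), Dom_build_signal_params_string parameters_array → Spec_build_signal_params_string parameters_array (build_signal_params_string parameters_array)

-- ===== LEMMAS AND PROOFS =====

-- even/odd-position sublists of a list
def pvEvens : List String → List String
  | [] => []
  | [x] => [x]
  | x :: _ :: rest => x :: pvEvens rest

def pvOdds : List String → List String
  | [] => []
  | [_] => []
  | _ :: y :: rest => y :: pvOdds rest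

theorem pvGvt_eq (t : String) : get_variant_type_alt t = get_variant_type t := rfl

theorem pvMod_two_even (k : Nat) : PySem.Int.mod (2 * (k : Int)) 2 = 0 := by
  simp [PySem.Int.mod]

theorem pvMod_two_odd (k : Nat) : PySem.Int.mod (2 * (k : Int) + 1) 2 = 1 := by
  simp [PySem.Int.mod]

theorem pvLoop1_eq (L : List String) : ∀ (k : Nat) (ts ns : List String),
    pvLoop1 L (2 * (k : Int)) (ts, ns)
      = (ts ++ (pvEvens L).map PySem.Str.strip, ns ++ (pvOdds L).map PySem.Str.strip) := by
  induction L using pvEvens.induct with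
  | case1 => intro k ts ns; simp [pvLoop1, pvEvens, pvOdds]
  | case2 x =>
    intro k ts ns
    simp [pvLoop1, pvEvens, pvOdds]
  | case3 x y rest ih =>
    intro k ts ns
    simp only [pvLoop1, pvMod_two_even k, pvMod_two_odd k]
    norm_num
    have h3 := ih (k + 1)
    push_cast at h3
    rw [show (2 * (k : Int) + 1 + 1) = 2 * ((k : Int) + 1) from by ring, h3]
    simp [pvEvens, pvOdds]

theorem pvLoop2_eq (L : List String) : ∀ (k : Nat) (pre : List String) (acc : String),
    pre.length = k →
    pvLoop2 ((pvEvens L).map PySem.Str.strip) (k : Int)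
        (pre ++ (pvOdds L).map PySem.Str.strip) acc
      = acc ++ pvGo L (k : Int) := by
  induction L using pvEvens.induct with
  | case1 =>
    intro k pre acc h
    simp [pvLoop2, pvGo, pvEvens, pvOdds]
  | case2 x =>
    intro k pre acc h
    subst h
    simp only [pvEvens, pvOdds, List.map_cons, List.map_nil, List.append_nil]
    simp only [pvLoop2, pvGo]
    rw [if_neg (by omega : ¬ ((pre.length : Int) < (pre.length : Int)))]
    simp [pvGvt_eq, String.append_empty]
  | case3 x y rest ih =>
    intro k pre acc h
    subst h
    simp only [pvEvens, pvOdds, List.map_cons]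
    simp only [pvLoop2, pvGo]
    rw [if_pos (by simp :
          ((pre.length : Int) < ((pre ++ PySem.Str.strip y :: (pvOdds rest).map PySem.Str.strip).length : Int)))]
    have hget : PySem.List.pyGetD (pre ++ PySem.Str.strip y :: (pvOdds rest).map PySem.Str.strip)
        ((pre.length : Nat) : Int) "" = PySem.Str.strip y := by
      simp [PySem.List.pyGetD]
    rw [hget]
    have h2 : ((pre.length : Int) + 1) = ((pre.length + 1 : Nat) : Int) := by push_cast; ring
    have hre : pre ++ PySem.Str.strip y :: (pvOdds rest).map PySem.Str.strip
        = (pre ++ [PySem.Str.strip y]) ++ (pvOdds rest).map PySem.Str.strip := by simp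
    rw [h2, hre, ih (pre.length + 1) (pre ++ [PySem.Str.strip y]) _ (by simp)]
    simp [pvGvt_eq, String.append_assoc]

-- ===== VERDICT (by name: the statement is the Claim_ definition above) =====
theorem build_signal_params_string_spec : Claim_equal_build_signal_params_string := by
  intro s _
  unfold Spec_build_signal_params_string build_signal_params_string build_signal_params_string_alt
  have h1 := pvLoop1_eq ((PySem.Str.split? s ",").getD []) 0 [] []
  simp only [Nat.cast_zero, mul_zero, List.nil_append] at h1
  rw [h1]
  have h2 := pvLoop2_eq ((PySem.Str.split? s ",").getD []) 0 [] "" rfl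
  simp only [Nat.cast_zero, List.nil_append] at h2
  rw [h2]
  simp
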